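-- pv_equiv track=rewrite | github.com/thumbzzero/problem-solving | Lv.2/70129.py | solution
-- ===== SOURCE A (Python) =====
-- def solution(s):
--     count = 0
--     deleted_zero = 0
--
--     while (len(s) != 1):
--         previous = len(s)
--         s = s.replace('0', '')
--         current = len(s)
--         s = str(format(len(s), 'b'))
--         count += 1
--         deleted_zero += previous - current
--
--     return [count, deleted_zero]
-- ===== SOURCE B (Python) =====
-- def solution(s):
--     if len(s) == 1:
--         return [0, 0]
--     zeros = s.count('0')
--     deleted = zeros
--     m = len(s) - zeros
--     count = 1
--     while m >= 2:
--         deleted += m.bit_length() - m.bit_count()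
--         m = m.bit_count()
--         count += 1
--     return [count, deleted]
-- ===== Notes on version B (the rewrite author's own statement) =====
-- stated objective: alternative
-- what changed: B replaces the evolving string state by an integer m (the count of non-'0' characters): after one step from the input string it iterates with bit_length/bit_count arithmetic instead of rebuilding binary strings via replace/format.
import Mathlib
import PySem

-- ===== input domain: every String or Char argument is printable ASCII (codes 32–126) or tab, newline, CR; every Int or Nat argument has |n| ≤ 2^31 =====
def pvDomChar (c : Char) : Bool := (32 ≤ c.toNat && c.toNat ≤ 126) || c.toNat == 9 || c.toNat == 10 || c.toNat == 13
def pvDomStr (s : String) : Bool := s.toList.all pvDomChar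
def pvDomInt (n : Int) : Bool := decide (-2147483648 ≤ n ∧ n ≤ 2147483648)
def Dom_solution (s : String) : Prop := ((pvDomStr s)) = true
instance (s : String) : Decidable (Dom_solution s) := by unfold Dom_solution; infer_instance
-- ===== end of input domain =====

-- B keeps only the integer count of non-'0' characters and iterates with bit arithmetic,
-- instead of A's repeated string rebuilding; same return value everywhere (alternative, not faster).

-- ===== PORT A =====
-- format(n, 'b'): most-significant-bit-first binary digits of n (format(0,'b') = "0"); exact.
def binDigits (n : Nat) : List Char :=
  if h : n = 0 then [] else binDigits (n / 2) ++ [if n % 2 = 1 then '1' else '0']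
decreasing_by exact Nat.div_lt_self (Nat.pos_of_ne_zero h) (by omega)

def toBin (n : Nat) : List Char := if n = 0 then ['0'] else binDigits n

-- A's while-loop; fuel is only a totality guard (length s + 2 always suffices, proved below).
def loopA : Nat → List Char → Int → Int → List Int
  | 0, _, c, d => [c, d]
  | fuel + 1, s, c, d =>
    if s.length = 1 then [c, d]
    else
      let previous := s.length
      let t := s.filter (fun ch => ch != '0')      -- s.replace('0', '')
      let current := t.length
      loopA fuel (toBin current) (c + 1) (d + ((previous : Int) - (current : Int)))

def solution (s : String) : List Int := loopA (s.toList.length + 2) s.toList 0 0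

-- ===== PORT B =====
-- Python int.bit_length / int.bit_count on nonnegative ints; exact.
def bitLen (n : Nat) : Nat :=
  if h : n = 0 then 0 else bitLen (n / 2) + 1
decreasing_by exact Nat.div_lt_self (Nat.pos_of_ne_zero h) (by omega)

def popCnt (n : Nat) : Nat :=
  if h : n = 0 then 0 else popCnt (n / 2) + n % 2
decreasing_by exact Nat.div_lt_self (Nat.pos_of_ne_zero h) (by omega)

theorem popCnt_le (n : Nat) : popCnt n ≤ n := by
  induction n using Nat.strong_induction_on with
  | _ n ih =>
    rw [popCnt]
    split
    · omega
    · have h1 := ih (n / 2) (Nat.div_lt_self (Nat.pos_of_ne_zero (by assumption)) (by omega))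
      omega

theorem popCnt_lt (n : Nat) (h : 2 ≤ n) : popCnt n < n := by
  rw [popCnt]
  split
  · omega
  · have := popCnt_le (n / 2)
    omega

def loopB (m : Nat) (count deleted : Int) : List Int :=
  if h : 2 ≤ m then
    loopB (popCnt m) (count + 1) (deleted + ((bitLen m : Int) - (popCnt m : Int)))
  else [count, deleted]
termination_by m
decreasing_by exact popCnt_lt m h

def solution_alt (s : String) : List Int :=
  let l := s.toList
  if l.length = 1 then [0, 0]
  else
    let zeros := l.count '0'
    let m := l.length - zeros
    loopB m 1 (zeros : Int)

-- ===== PRECONDITION & SPEC =====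
def Spec_solution (s : String) (out : List Int) : Prop := out = solution_alt s
instance (s : String) (out : List Int) : Decidable (Spec_solution s out) := by unfold Spec_solution; infer_instance

-- ===== CLAIM (what is proved, stated in full; the proofs are below) =====
def Claim_equal_solution : Prop := ∀ (s : String), Dom_solution s → Spec_solution s (solution s)

-- ===== LEMMAS AND PROOFS =====

theorem binDigits_length (n : Nat) : (binDigits n).length = bitLen n := by
  induction n using Nat.strong_induction_on with
  | _ n ih =>
    rw [binDigits, bitLen]
    split
    · simp
    · rename_i h
      simp [ih (n / 2) (Nat.div_lt_self (Nat.pos_of_ne_zero h) (by omega))]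

theorem binDigits_nonzero (n : Nat) :
    ((binDigits n).filter (fun ch => ch != '0')).length = popCnt n := by
  induction n using Nat.strong_induction_on with
  | _ n ih =>
    rw [binDigits, popCnt]
    split
    · simp
    · rename_i h
      rw [List.filter_append]
      have hh := ih (n / 2) (Nat.div_lt_self (Nat.pos_of_ne_zero h) (by omega))
      by_cases hm : n % 2 = 1 <;> simp [hm, hh] <;> omega

theorem bitLen_pos (n : Nat) (h : 1 ≤ n) : 1 ≤ bitLen n := by
  rw [bitLen]; split <;> omega

theorem bitLen_two (n : Nat) (h : 2 ≤ n) : 2 ≤ bitLen n := by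
  rw [bitLen]
  split
  · omega
  · have := bitLen_pos (n / 2) (by omega)
    omega

theorem toBin_length_one (m : Nat) (h : m ≤ 1) : (toBin m).length = 1 := by
  interval_cases m <;> simp [toBin, binDigits, bitLen]

-- on binary strings, A's loop is B's loop
theorem loopA_bin (m : Nat) : ∀ fuel c d, m ≤ fuel →
    loopA (fuel + 1) (toBin m) c d = loopB m c d := by
  induction m using Nat.strong_induction_on with
  | _ m ih =>
    intro fuel c d hfuel
    by_cases h2 : 2 ≤ m
    · have hlen : (toBin m).length = bitLen m := by
        rw [toBin, if_neg (by omega : ¬ m = 0), binDigits_length]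
      have hne : (toBin m).length ≠ 1 := by
        have := bitLen_two m h2; omega
      have hcur : ((toBin m).filter (fun ch => ch != '0')).length = popCnt m := by
        rw [toBin, if_neg (by omega : ¬ m = 0)]; exact binDigits_nonzero m
      rw [loopA]
      simp only [hcur, hlen]
      rw [if_neg (show ¬ bitLen m = 1 by have := bitLen_two m h2; omega)]
      have hlt := popCnt_lt m h2
      obtain ⟨fuel', rfl⟩ : ∃ f, fuel = f + 1 := ⟨fuel - 1, by omega⟩
      rw [ih (popCnt m) hlt fuel' _ _ (by omega)]
      conv_rhs => rw [loopB]
      rw [dif_pos h2]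
    · rw [loopA, loopB]
      simp [toBin_length_one m (by omega), h2]

theorem filter_length_count (l : List Char) :
    (l.filter (fun ch => ch != '0')).length = l.length - l.count '0' := by
  induction l with
  | nil => simp
  | cons a t ih =>
    by_cases h : a = '0' <;>
      simp [List.count_cons, h, ih] <;>
      have := List.count_le_length (l := t) (a := '0') <;> omega

-- ===== VERDICT (by name: the statement is the Claim_ definition above) =====
theorem solution_spec : Claim_equal_solution := by
  intro s _
  unfold Spec_solution solution solution_alt
  set l := s.toList with hl
  by_cases h1 : l.length = 1
  · rw [loopA]; simp [h1]
  · rw [loopA]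
    simp only [h1, if_false]
    have hm : (l.filter (fun ch => ch != '0')).length = l.length - l.count '0' :=
      filter_length_count l
    have hcle := List.count_le_length (l := l) (a := '0')
    rw [loopA_bin _ _ _ _ (by omega)]
    rw [hm]
    have : ((l.length : Int) - ((l.length - l.count '0' : Nat) : Int)) = (l.count '0' : Int) := by
      push_cast [Nat.cast_sub hcle]; ring
    simp [this]
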